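-- pv_equiv track=rewrite | github.com/kakurai49/stories | scripts/html_to_micro_v2.py | _parts_to_inlines
-- ===== SOURCE A (Python) =====
-- from typing import Dict, Iterable, List
--
-- def _append_text_inline(inlines: List[Dict[str, str]], text: str) -> None:
--     if not text:
--         return
--     if inlines and inlines[-1].get("type") == "Text":
--         inlines[-1]["text"] += text
--     else:
--         inlines.append({"type": "Text", "text": text})
--
-- def _parts_to_inlines(parts: List[tuple[str, str, str | None]], href_hint: str | None) -> List[Dict[str, str]]:
--     inlines: List[Dict[str, str]] = []
--     for idx, (kind, value, href) in enumerate(parts):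
--         if idx > 0:
--             _append_text_inline(inlines, " ")
--         if kind == "text":
--             _append_text_inline(inlines, value)
--         else:
--             inlines.append({"type": "InlineLink", "label": value, "href": href or href_hint or ""})
--     return inlines or [{"type": "Text", "text": ""}]
-- ===== SOURCE B (Python) =====
-- def _parts_to_inlines(parts, href_hint):
--     # Phase 1: flat token stream ("text", s) / ("link", dict)
--     tokens = []
--     for i, (kind, value, href) in enumerate(parts):
--         if i > 0:
--             tokens.append(("text", " "))
--         if kind == "text":
--             tokens.append(("text", value))
--         else:
--             tokens.append(("link", {"type": "InlineLink", "label": value,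
--                                     "href": href or href_hint or ""}))
--     # Phase 2: collapse runs of text tokens, dropping empty merged runs
--     out = []
--     buf = ""
--     for kind, payload in tokens:
--         if kind == "text":
--             buf += payload
--         else:
--             if buf:
--                 out.append({"type": "Text", "text": buf})
--             buf = ""
--             out.append(payload)
--     if buf:
--         out.append({"type": "Text", "text": buf})
--     return out or [{"type": "Text", "text": ""}]
-- ===== Notes on version B (the rewrite author's own statement) =====
-- stated objective: alternative
-- what changed: A builds the inline list in one pass, mutating the last inline in place to merge adjacent Text; B first emits a flat token stream (separators, texts, links) and then collapses maximal text runs with a string buffer in a second pass, dropping empty merged runs.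
import Mathlib
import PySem

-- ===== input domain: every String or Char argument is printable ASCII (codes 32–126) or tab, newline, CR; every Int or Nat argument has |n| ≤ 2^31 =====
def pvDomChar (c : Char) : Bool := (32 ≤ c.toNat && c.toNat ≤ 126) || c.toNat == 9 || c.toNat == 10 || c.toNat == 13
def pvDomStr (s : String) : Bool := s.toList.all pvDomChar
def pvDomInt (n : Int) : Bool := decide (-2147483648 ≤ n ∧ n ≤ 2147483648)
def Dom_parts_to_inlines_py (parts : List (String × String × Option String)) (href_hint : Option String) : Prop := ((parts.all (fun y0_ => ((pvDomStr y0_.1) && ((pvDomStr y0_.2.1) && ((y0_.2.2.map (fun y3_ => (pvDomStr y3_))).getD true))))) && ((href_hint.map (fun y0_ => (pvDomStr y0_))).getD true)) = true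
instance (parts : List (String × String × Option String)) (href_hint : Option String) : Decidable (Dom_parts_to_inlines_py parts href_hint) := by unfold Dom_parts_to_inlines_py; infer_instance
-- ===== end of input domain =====

-- B rebuilds the same inlines via a token stream and a second collapsing pass (alternative decomposition; same cost).
-- ===== PORT A =====
-- dict lookup d.get(k) on an assoc list (first match) — exact for string-keyed dicts
def pvAGet? (d : List (String × String)) (k : String) : Option String :=
  match d with
  | [] => none
  | (k', v) :: rest => if k' = k then some v else pvAGet? rest k

-- d[k] += t for a key k present in d (in-place overwrite keeps position) — exact here:
-- every Text dict A builds carries the key "text"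
def pvAAddAt (d : List (String × String)) (k : String) (t : String) : List (String × String) :=
  match d with
  | [] => []
  | (k', v) :: rest => if k' = k then (k', v ++ t) :: rest else (k', v) :: pvAAddAt rest k t

-- _append_text_inline: early return on empty text; merge into a trailing Text inline, else append
def pvAppendTextInline (inlines : List (List (String × String))) (text : String) :
    List (List (String × String)) :=
  if text = "" then inlines
  else
    match inlines.getLast? with
    | some last =>
        if pvAGet? last "type" = some "Text" then
          inlines.dropLast ++ [pvAAddAt last "text" text]
        else inlines ++ [[("type", "Text"), ("text", text)]]
    | none => inlines ++ [[("type", "Text"), ("text", text)]]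

-- href or href_hint or ""
def pvHrefA (href : Option String) (href_hint : Option String) : String :=
  match href with
  | some h => if h ≠ "" then h else (match href_hint with | some g => if g ≠ "" then g else "" | none => "")
  | none => (match href_hint with | some g => if g ≠ "" then g else "" | none => "")

-- for idx, (kind, value, href) in enumerate(parts): …
def pvLoopA (href_hint : Option String) (idx : Nat)
    (inlines : List (List (String × String))) :
    List (String × String × Option String) → List (List (String × String))
  | [] => inlines
  | (kind, value, href) :: rest =>
      let inlines := if idx > 0 then pvAppendTextInline inlines " " else inlines
      let inlines :=
        if kind = "text" then pvAppendTextInline inlines value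
        else inlines ++ [[("type", "InlineLink"), ("label", value), ("href", pvHrefA href href_hint)]]
      pvLoopA href_hint (idx + 1) inlines rest

def parts_to_inlines_py (parts : List (String × String × Option String)) (href_hint : Option String) : List (List (String × String)) :=
  let inlines := pvLoopA href_hint 0 [] parts
  if inlines = [] then [[("type", "Text"), ("text", "")]] else inlines

-- ===== PORT B =====
inductive PvTok where
  | text (s : String)
  | link (d : List (String × String))
deriving DecidableEq, Repr

def pvHrefB (href : Option String) (href_hint : Option String) : String :=
  match href with
  | some h => if h ≠ "" then h else (match href_hint with | some g => if g ≠ "" then g else "" | none => "")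
  | none => (match href_hint with | some g => if g ≠ "" then g else "" | none => "")

-- phase 1: for i, (kind, value, href) in enumerate(parts): emit tokens
def pvTokens (href_hint : Option String) (i : Nat) :
    List (String × String × Option String) → List PvTok
  | [] => []
  | (kind, value, href) :: rest =>
      (if i > 0 then [PvTok.text " "] else []) ++
      (if kind = "text" then [PvTok.text value]
       else [PvTok.link [("type", "InlineLink"), ("label", value), ("href", pvHrefB href href_hint)]]) ++
      pvTokens href_hint (i + 1) rest

-- phase 2 loop body: collapse text runs into buf, flush nonempty buf before a link
def pvCollapseStep (st : List (List (String × String)) × String) (tok : PvTok) :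
    List (List (String × String)) × String :=
  match tok with
  | .text s => (st.1, st.2 ++ s)
  | .link d => ((st.1 ++ (if st.2 ≠ "" then [[("type", "Text"), ("text", st.2)]] else [])) ++ [d], "")

def parts_to_inlines_py_alt (parts : List (String × String × Option String)) (href_hint : Option String) : List (List (String × String)) :=
  let tokens := pvTokens href_hint 0 parts
  let st := tokens.foldl pvCollapseStep ([], "")
  let out := st.1 ++ (if st.2 ≠ "" then [[("type", "Text"), ("text", st.2)]] else [])
  if out = [] then [[("type", "Text"), ("text", "")]] else out

-- ===== PRECONDITION & SPEC =====
def Spec_parts_to_inlines_py (parts : List (String × String × Option String)) (href_hint : Option String) (out : List (List (String × String))) : Prop := out = parts_to_inlines_py_alt parts href_hint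
instance (parts : List (String × String × Option String)) (href_hint : Option String) (out : List (List (String × String))) : Decidable (Spec_parts_to_inlines_py parts href_hint out) := by unfold Spec_parts_to_inlines_py; infer_instance

-- ===== CLAIM (what is proved, stated in full; the proofs are below) =====
def Claim_equal_parts_to_inlines_py : Prop := ∀ (parts : List (String × String × Option String)) (href_hint : Option String), Dom_parts_to_inlines_py parts href_hint → Spec_parts_to_inlines_py parts href_hint (parts_to_inlines_py parts href_hint)

-- ===== LEMMAS AND PROOFS =====

-- flush of B's pending text buffer
def pvFlush (buf : String) : List (List (String × String)) :=
  if buf ≠ "" then [[("type", "Text"), ("text", buf)]] else []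

-- invariant on B's accumulated output: it never ends in a Text inline
def pvOkOut (out : List (List (String × String))) : Prop :=
  ∀ d, out.getLast? = some d → pvAGet? d "type" ≠ some "Text"

theorem pv_append_ne_empty (a b : String) (h : a ≠ "") : a ++ b ≠ "" := by
  intro hc
  exact h (String.append_eq_empty_iff.mp hc).1

theorem pv_append_space_ne (buf : String) : buf ++ " " ≠ "" := by
  intro hc
  exact absurd (String.append_eq_empty_iff.mp hc).2 (by decide)

theorem pv_flush_ne (buf : String) (h : buf ≠ "") :
    pvFlush buf = [[("type", "Text"), ("text", buf)]] := by
  unfold pvFlush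
  rw [if_pos h]

-- core correspondence: A's append-text on a state of shape out ++ flush buf
theorem pv_append_flush (out : List (List (String × String))) (buf s : String)
    (hok : pvOkOut out) :
    pvAppendTextInline (out ++ pvFlush buf) s = out ++ pvFlush (buf ++ s) := by
  by_cases hs : s = ""
  · subst hs
    simp [pvAppendTextInline, String.append_empty]
  · by_cases hb : buf = ""
    · subst hb
      have h2 : pvFlush ("" ++ s) = [[("type", "Text"), ("text", s)]] := by
        rw [String.empty_append, pv_flush_ne s hs]
      rw [show pvFlush "" = [] from rfl, List.append_nil, h2]
      unfold pvAppendTextInline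
      rw [if_neg hs]
      cases hlast : out.getLast? with
      | none => rfl
      | some d =>
        have hne := hok d hlast
        simp [hne]
    · rw [pv_flush_ne buf hb, pv_flush_ne (buf ++ s) (pv_append_ne_empty buf s hb)]
      unfold pvAppendTextInline
      rw [if_neg hs, List.getLast?_concat]
      simp [pvAGet?, pvAAddAt]

theorem pv_okOut_link (out : List (List (String × String))) (value : String) (h : String) :
    pvOkOut (out ++ [[("type", "InlineLink"), ("label", value), ("href", h)]]) := by
  intro d hd
  rw [List.getLast?_concat] at hd
  cases hd
  simp [pvAGet?]

-- main loop invariant: A's loop from any state out ++ flush buf equals B's collapse of the remaining tokens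
theorem pv_loop_inv (href_hint : Option String)
    (rest : List (String × String × Option String)) :
    ∀ (idx : Nat) (out : List (List (String × String))) (buf : String),
    1 ≤ idx → pvOkOut out →
    pvLoopA href_hint idx (out ++ pvFlush buf) rest =
      (let st := (pvTokens href_hint idx rest).foldl pvCollapseStep (out, buf)
       st.1 ++ pvFlush st.2) := by
  induction rest with
  | nil => intro idx out buf _ _; simp [pvLoopA, pvTokens]
  | cons p rest ih =>
    intro idx out buf hidx hok
    obtain ⟨kind, value, href⟩ := p
    have hpos : 0 < idx := hidx
    simp only [pvLoopA, pvTokens]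
    rw [if_pos hpos, if_pos hpos]
    by_cases hk : kind = "text"
    · rw [if_pos hk, if_pos hk]
      rw [pv_append_flush out buf " " hok, pv_append_flush out (buf ++ " ") value hok]
      rw [ih (idx + 1) out ((buf ++ " ") ++ value) (by omega) hok]
      simp [pvCollapseStep]
    · rw [if_neg hk, if_neg hk]
      rw [pv_append_flush out buf " " hok]
      have := ih (idx + 1)
        ((out ++ pvFlush (buf ++ " ")) ++ [[("type", "InlineLink"), ("label", value), ("href", pvHrefA href href_hint)]])
        "" (by omega) (pv_okOut_link _ value _)
      rw [show pvFlush "" = [] from rfl, List.append_nil] at this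
      rw [this]
      have hAB : pvHrefA = pvHrefB := rfl
      simp [pvCollapseStep, hAB, pv_flush_ne (buf ++ " ") (pv_append_space_ne buf)]

theorem pv_loops_eq (parts : List (String × String × Option String)) (href_hint : Option String) :
    pvLoopA href_hint 0 [] parts =
      (let st := (pvTokens href_hint 0 parts).foldl pvCollapseStep ([], "")
       st.1 ++ pvFlush st.2) := by
  cases parts with
  | nil => simp [pvLoopA, pvTokens, pvFlush]
  | cons p rest =>
    obtain ⟨kind, value, href⟩ := p
    simp only [pvLoopA, pvTokens, gt_iff_lt, Nat.lt_irrefl, if_false]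
    by_cases hk : kind = "text"
    · rw [if_pos hk, if_pos hk]
      have hA : pvAppendTextInline [] value = [] ++ pvFlush value := by
        by_cases hv : value = ""
        · subst hv; rfl
        · rw [pv_flush_ne value hv]
          unfold pvAppendTextInline
          rw [if_neg hv]
          rfl
      rw [hA, pv_loop_inv href_hint rest 1 [] value (le_refl 1) (by intro d hd; simp at hd)]
      simp [pvCollapseStep, String.empty_append]
    · rw [if_neg hk, if_neg hk]
      have := pv_loop_inv href_hint rest 1
        ([] ++ [[("type", "InlineLink"), ("label", value), ("href", pvHrefA href href_hint)]]) ""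
        (le_refl 1) (pv_okOut_link [] value _)
      rw [show pvFlush "" = [] from rfl, List.append_nil, List.nil_append] at this
      simp only [Nat.zero_add, List.nil_append]
      rw [this]
      have hAB : pvHrefA = pvHrefB := rfl
      simp [pvCollapseStep, hAB]

-- ===== VERDICT (by name: the statement is the Claim_ definition above) =====
theorem parts_to_inlines_py_spec : Claim_equal_parts_to_inlines_py := by
  intro parts href_hint _
  unfold Spec_parts_to_inlines_py parts_to_inlines_py parts_to_inlines_py_alt
  rw [pv_loops_eq parts href_hint]
  rfl
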